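-- pv_equiv track=rewrite | github.com/kunavamshi/gfg-potd | Difficulty: Medium/Maximum People Visible in a Line/maximum-people-visible-in-a-line.py | maxPeople
-- ===== SOURCE A (Python) =====
-- def maxPeople(arr):
--     n = len(arr)
--
--     # Previous greater or equal element index
--     prev_ge = [-1] * n
--     stack = []
--     for i in range(n):
--         while stack and arr[stack[-1]] < arr[i]:
--             stack.pop()
--         prev_ge[i] = stack[-1] if stack else -1
--         stack.append(i)
--
--     # Next greater or equal element index
--     next_ge = [n] * n
--     stack = []
--     for i in range(n - 1, -1, -1):
--         while stack and arr[stack[-1]] < arr[i]: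
--             stack.pop()
--         next_ge[i] = stack[-1] if stack else n
--         stack.append(i)
--
--     ans = 0
--     for i in range(n):
--         left_visible = i - prev_ge[i] - 1
--         right_visible = next_ge[i] - i - 1
--         ans = max(ans, left_visible + right_visible + 1)
--
--     return ans
-- ===== SOURCE B (Python) =====
-- def maxPeople(arr):
--     n = len(arr)
--     ans = 0
--     for i in range(n):
--         count = 1
--         j = i - 1
--         while j >= 0 and arr[j] < arr[i]:
--             count += 1
--             j -= 1
--         j = i + 1
--         while j < n and arr[j] < arr[i]:
--             count += 1
--             j += 1
--         ans = max(ans, count)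
--     return ans
-- ===== Notes on version B (the rewrite author's own statement) =====
-- stated objective: simpler
-- what changed: Replaced the two monotonic-stack passes and the prev_ge/next_ge index tables by a direct per-index scan: for each i count the consecutive strictly-smaller neighbours leftward and rightward and take the maximum of the counts.
import Mathlib
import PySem

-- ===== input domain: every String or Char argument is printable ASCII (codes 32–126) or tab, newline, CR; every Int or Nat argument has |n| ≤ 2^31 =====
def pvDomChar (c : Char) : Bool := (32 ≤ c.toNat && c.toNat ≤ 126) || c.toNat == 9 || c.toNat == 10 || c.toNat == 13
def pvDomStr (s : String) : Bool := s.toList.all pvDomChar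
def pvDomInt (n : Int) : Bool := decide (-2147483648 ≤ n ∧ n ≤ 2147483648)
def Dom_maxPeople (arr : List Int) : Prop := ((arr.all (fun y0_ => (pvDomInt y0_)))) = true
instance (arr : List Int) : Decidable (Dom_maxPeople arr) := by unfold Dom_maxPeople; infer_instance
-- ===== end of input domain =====

-- B replaces A's two monotonic-stack passes by direct left/right scans per index (simpler; same return value).

-- ===== PORT A =====
-- the inner 'while stack and arr[stack[-1]] < arr[i]: stack.pop()' loop; stack top = list head.
-- all indices stored on the stack are in range, so 'arr.getD t 0' is exactly Python's arr[t] here.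
def popLoop (arr : List Int) (v : Int) : List Nat → List Nat
  | [] => []
  | t :: rest => if arr.getD t 0 < v then popLoop arr v rest else t :: rest

-- one iteration of the first pass: state = (stack, prev_ge so far); prev_ge[i] is appended in order.
def prevStep (arr : List Int) (s : List Nat × List Int) (i : Nat) : List Nat × List Int :=
  let st := popLoop arr (arr.getD i 0) s.1
  let p : Int := match st with | [] => -1 | t :: _ => (t : Int)
  (i :: st, s.2 ++ [p])

-- one iteration of the second pass (i runs n-1 … 0, so next_ge[i] is prepended to keep index order).
def nextStep (arr : List Int) (s : List Nat × List Int) (i : Nat) : List Nat × List Int :=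
  let st := popLoop arr (arr.getD i 0) s.1
  let q : Int := match st with | [] => (arr.length : Int) | t :: _ => (t : Int)
  (i :: st, q :: s.2)

def maxPeople (arr : List Int) : Int :=
  let n := arr.length
  let pg := ((List.range n).foldl (prevStep arr) ([], [])).2
  -- range(n-1, -1, -1) is (range n).reverse
  let ng := (((List.range n).reverse).foldl (nextStep arr) ([], [])).2
  (List.range n).foldl (fun (ans : Int) (i : Nat) =>
    let left : Int := (i : Int) - pg.getD i 0 - 1
    let right : Int := ng.getD i 0 - (i : Int) - 1
    max ans (left + right + 1)) 0

-- ===== PORT B =====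
-- 'j = i-1; while j >= 0 and arr[j] < v: count += 1; j -= 1' — clen arr v i counts that run below index i.
def clen (arr : List Int) (v : Int) : Nat → Nat
  | 0 => 0
  | j + 1 => if arr.getD j 0 < v then clen arr v j + 1 else 0

-- 'j = i+1; while j < n and arr[j] < v: count += 1; j += 1' — crlen arr v j counts that run from index j up.
def crlen (arr : List Int) (v : Int) (j : Nat) : Nat :=
  if h : j < arr.length then
    if arr.getD j 0 < v then crlen arr v (j + 1) + 1 else 0
  else 0
termination_by arr.length - j

def maxPeople_alt (arr : List Int) : Int :=
  (List.range arr.length).foldl (fun ans i =>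
    max ans ((1 + clen arr (arr.getD i 0) i + crlen arr (arr.getD i 0) (i + 1) : Nat) : Int)) 0

-- ===== PRECONDITION & SPEC =====
def Spec_maxPeople (arr : List Int) (out : Int) : Prop := out = maxPeople_alt arr
instance (arr : List Int) (out : Int) : Decidable (Spec_maxPeople arr out) := by unfold Spec_maxPeople; infer_instance

-- ===== CLAIM (what is proved, stated in full; the proofs are below) =====
def Claim_equal_maxPeople : Prop := ∀ (arr : List Int), Dom_maxPeople arr → Spec_maxPeople arr (maxPeople arr)

-- ===== LEMMAS AND PROOFS =====

-- stack of the first pass after processing indices 0..i-1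
def pvS (arr : List Int) : Nat → List Nat
  | 0 => []
  | i + 1 => i :: popLoop arr (arr.getD i 0) (pvS arr i)

-- the value written to prev_ge[i]
def pvP (arr : List Int) (i : Nat) : Int :=
  match popLoop arr (arr.getD i 0) (pvS arr i) with | [] => -1 | t :: _ => (t : Int)

-- stack of the second pass after processing m indices (n-1 down to n-m)
def pvT (arr : List Int) (n : Nat) : Nat → List Nat
  | 0 => []
  | m + 1 => (n - 1 - m) :: popLoop arr (arr.getD (n - 1 - m) 0) (pvT arr n m)

-- the value written to next_ge[i]  (i = n-1-m)
def pvQ (arr : List Int) (n i : Nat) : Int :=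
  match popLoop arr (arr.getD i 0) (pvT arr n (n - 1 - i)) with | [] => (n : Int) | t :: _ => (t : Int)

theorem popLoop_eq_dropWhile (arr : List Int) (v : Int) (st : List Nat) :
    popLoop arr v st = st.dropWhile (fun j => decide (arr.getD j 0 < v)) := by
  induction st with
  | nil => rfl
  | cons t rest ih =>
      by_cases h : arr.getD t 0 < v <;> simp only [popLoop, List.dropWhile, h, decide_true, decide_false, if_pos, if_neg, not_false_iff, ih]

theorem dropWhile_head_false {α : Type} (p : α → Bool) (l : List α) (x : α) (xs : List α)
    (h : l.dropWhile p = x :: xs) : p x = false := by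
  induction l with
  | nil => simp at h
  | cons a as ih =>
      by_cases hp : p a
      · simp [List.dropWhile, hp] at h; exact ih h
      · simp [List.dropWhile, hp] at h; rcases h with ⟨h1, _⟩; subst h1; simpa using hp

-- invariant of the first-pass stack
def pvCover (arr : List Int) (i : Nat) (st : List Nat) : Prop :=
  ∀ j, j < i → j ∉ st → ∃ k ∈ st, j < k ∧ k < i ∧ arr.getD j 0 < arr.getD k 0

theorem mem_of_mem_dropWhile {α : Type} (p : α → Bool) (l : List α) (x : α)
    (h : x ∈ l.dropWhile p) : x ∈ l :=
  (List.dropWhile_sublist p (l := l)).subset h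

theorem takeWhile_or_dropWhile {α : Type} (p : α → Bool) (l : List α) (x : α)
    (hx : x ∈ l) (hnd : x ∉ l.dropWhile p) : p x = true := by
  have := List.takeWhile_append_dropWhile (p := p) (l := l)
  rw [← this] at hx
  rcases List.mem_append.mp hx with h | h
  · exact List.mem_takeWhile_imp h
  · exact absurd h hnd

theorem pvS_inv (arr : List Int) (i : Nat) :
    (pvS arr i).Pairwise (· > ·) ∧ (∀ j ∈ pvS arr i, j < i) ∧ pvCover arr i (pvS arr i) := by
  induction i with
  | zero =>
      refine ⟨List.Pairwise.nil, by simp [pvS], ?_⟩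
      intro j hj; omega
  | succ i ih =>
      obtain ⟨hpw, hlt, hcov⟩ := ih
      have hdw : popLoop arr (arr.getD i 0) (pvS arr i)
          = (pvS arr i).dropWhile (fun j => decide (arr.getD j 0 < arr.getD i 0)) :=
        popLoop_eq_dropWhile arr _ _
      have hsub : ∀ x ∈ popLoop arr (arr.getD i 0) (pvS arr i), x ∈ pvS arr i := by
        intro x hx; rw [hdw] at hx; exact mem_of_mem_dropWhile _ _ _ hx
      refine ⟨?_, ?_, ?_⟩
      · refine List.Pairwise.cons ?_ ?_
        · intro j hj; exact hlt j (hsub j hj)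
        · rw [hdw]; exact hpw.sublist (List.dropWhile_sublist _)
      · intro j hj
        rcases List.mem_cons.mp hj with h | h
        · omega
        · exact Nat.lt_succ_of_lt (hlt j (hsub j h))
      · intro j hj hnot
        have hji : j ≠ i := by
          intro he; subst he; exact hnot (List.mem_cons_self)
        have hji' : j < i := by omega
        by_cases hmem : j ∈ pvS arr i
        · have hjr : j ∉ popLoop arr (arr.getD i 0) (pvS arr i) := by
            intro hc; exact hnot (List.mem_cons_of_mem _ hc)
          rw [hdw] at hjr
          have hp := takeWhile_or_dropWhile _ _ _ hmem hjr
          have : arr.getD j 0 < arr.getD i 0 := by simpa using hp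
          exact ⟨i, List.mem_cons_self, hji', by omega, this⟩
        · obtain ⟨k, hk, hjk, hki, hval⟩ := hcov j hji' hmem
          by_cases hkr : k ∈ popLoop arr (arr.getD i 0) (pvS arr i)
          · exact ⟨k, List.mem_cons_of_mem _ hkr, hjk, by omega, hval⟩
          · rw [hdw] at hkr
            have hp := takeWhile_or_dropWhile _ _ _ hk hkr
            have : arr.getD k 0 < arr.getD i 0 := by simpa using hp
            exact ⟨i, List.mem_cons_self, by omega, by omega, lt_trans hval this⟩

theorem prev_extract_empty (arr : List Int) (i : Nat)
    (h : popLoop arr (arr.getD i 0) (pvS arr i) = []) :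
    ∀ j, j < i → arr.getD j 0 < arr.getD i 0 := by
  obtain ⟨_, hlt, hcov⟩ := pvS_inv arr i
  rw [popLoop_eq_dropWhile] at h
  have hall : ∀ x ∈ pvS arr i, arr.getD x 0 < arr.getD i 0 := by
    intro x hx
    have := List.dropWhile_eq_nil_iff.mp h x hx
    simpa using this
  intro j hj
  by_cases hmem : j ∈ pvS arr i
  · exact hall j hmem
  · obtain ⟨k, hk, _, _, hval⟩ := hcov j hj hmem
    exact lt_trans hval (hall k hk)

theorem prev_extract_cons (arr : List Int) (i j0 : Nat) (rest : List Nat)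
    (h : popLoop arr (arr.getD i 0) (pvS arr i) = j0 :: rest) :
    j0 < i ∧ arr.getD i 0 ≤ arr.getD j0 0 ∧
      ∀ j, j0 < j → j < i → arr.getD j 0 < arr.getD i 0 := by
  obtain ⟨hpw, hlt, hcov⟩ := pvS_inv arr i
  rw [popLoop_eq_dropWhile] at h
  have hj0mem : j0 ∈ pvS arr i :=
    mem_of_mem_dropWhile _ _ _ (h ▸ List.mem_cons_self)
  have hj0i : j0 < i := hlt j0 hj0mem
  have hj0p : ¬ arr.getD j0 0 < arr.getD i 0 := by
    have := dropWhile_head_false _ _ _ _ h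
    simpa using this
  have hrmax : ∀ x ∈ (pvS arr i).dropWhile (fun j => decide (arr.getD j 0 < arr.getD i 0)),
      x ≤ j0 := by
    intro x hx
    rw [h] at hx
    rcases List.mem_cons.mp hx with he | hr
    · omega
    · have hpwr : (j0 :: rest).Pairwise (fun a b => a > b) :=
        h ▸ hpw.sublist (List.dropWhile_sublist _)
      have := (List.pairwise_cons.mp hpwr).1 x hr
      omega
  have key : ∀ d j, i - j ≤ d → j0 < j → j < i → arr.getD j 0 < arr.getD i 0 := by
    intro d
    induction d with
    | zero => intro j hd h1 h2; omega
    | succ d ihd =>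
        intro j hd h1 h2
        by_cases hmem : j ∈ pvS arr i
        · have hjnd : j ∉ (pvS arr i).dropWhile (fun j => decide (arr.getD j 0 < arr.getD i 0)) := by
            intro hc; have := hrmax j hc; omega
          have hp := takeWhile_or_dropWhile _ _ _ hmem hjnd
          simpa using hp
        · obtain ⟨k, hk, hjk, hki, hval⟩ := hcov j h2 hmem
          have : arr.getD k 0 < arr.getD i 0 := ihd k (by omega) (by omega) hki
          exact lt_trans hval this
  exact ⟨hj0i, not_lt.mp hj0p, fun j h1 h2 => key (i - j) j (le_refl _) h1 h2⟩

-- invariant of the second-pass stack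
def pvCoverR (arr : List Int) (n m : Nat) (st : List Nat) : Prop :=
  ∀ j, n - m ≤ j → j < n → j ∉ st → ∃ k ∈ st, k < j ∧ arr.getD j 0 < arr.getD k 0

theorem pvT_inv (arr : List Int) (n m : Nat) (hm : m ≤ n) :
    (pvT arr n m).Pairwise (· < ·) ∧ (∀ j ∈ pvT arr n m, n - m ≤ j ∧ j < n) ∧
      pvCoverR arr n m (pvT arr n m) := by
  induction m with
  | zero =>
      refine ⟨List.Pairwise.nil, by simp [pvT], ?_⟩
      intro j h1 h2 h3; omega
  | succ m ih =>
      obtain ⟨hpw, hrg, hcov⟩ := ih (by omega)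
      have hi : n - (m + 1) = n - 1 - m := by omega
      set i := n - 1 - m with hidef
      have hin : i < n := by omega
      have hnm : n - m = i + 1 := by omega
      have hdw : popLoop arr (arr.getD i 0) (pvT arr n m)
          = (pvT arr n m).dropWhile (fun j => decide (arr.getD j 0 < arr.getD i 0)) :=
        popLoop_eq_dropWhile arr _ _
      have hsub : ∀ x ∈ popLoop arr (arr.getD i 0) (pvT arr n m), x ∈ pvT arr n m := by
        intro x hx; rw [hdw] at hx; exact mem_of_mem_dropWhile _ _ _ hx
      refine ⟨?_, ?_, ?_⟩
      · refine List.Pairwise.cons ?_ ?_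
        · intro j hj
          have := (hrg j (hsub j hj)).1
          omega
        · rw [hdw]; exact hpw.sublist (List.dropWhile_sublist _)
      · intro j hj
        rcases List.mem_cons.mp hj with h | h
        · subst h; exact ⟨by omega, hin⟩
        · have := hrg j (hsub j h)
          exact ⟨by omega, this.2⟩
      · intro j hj1 hj2 hnot
        have hji : j ≠ i := by
          intro he; subst he; exact hnot (List.mem_cons_self)
        have hji' : n - m ≤ j := by omega
        by_cases hmem : j ∈ pvT arr n m
        · have hjr : j ∉ popLoop arr (arr.getD i 0) (pvT arr n m) := by
            intro hc; exact hnot (List.mem_cons_of_mem _ hc)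
          rw [hdw] at hjr
          have hp := takeWhile_or_dropWhile _ _ _ hmem hjr
          exact ⟨i, List.mem_cons_self, by omega, by simpa using hp⟩
        · obtain ⟨k, hk, hkj, hval⟩ := hcov j hji' hj2 hmem
          by_cases hkr : k ∈ popLoop arr (arr.getD i 0) (pvT arr n m)
          · exact ⟨k, List.mem_cons_of_mem _ hkr, hkj, hval⟩
          · rw [hdw] at hkr
            have hp := takeWhile_or_dropWhile _ _ _ hk hkr
            have : arr.getD k 0 < arr.getD i 0 := by simpa using hp
            exact ⟨i, List.mem_cons_self, by omega, lt_trans hval this⟩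

theorem next_extract_empty (arr : List Int) (n i : Nat) (hn : n = arr.length) (hi : i < n)
    (h : popLoop arr (arr.getD i 0) (pvT arr n (n - 1 - i)) = []) :
    ∀ j, i < j → j < n → arr.getD j 0 < arr.getD i 0 := by
  obtain ⟨_, hrg, hcov⟩ := pvT_inv arr n (n - 1 - i) (by omega)
  rw [popLoop_eq_dropWhile] at h
  have hall : ∀ x ∈ pvT arr n (n - 1 - i), arr.getD x 0 < arr.getD i 0 := by
    intro x hx
    have := List.dropWhile_eq_nil_iff.mp h x hx
    simpa using this
  intro j hj1 hj2
  by_cases hmem : j ∈ pvT arr n (n - 1 - i)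
  · exact hall j hmem
  · obtain ⟨k, hk, _, hval⟩ := hcov j (by omega) hj2 hmem
    exact lt_trans hval (hall k hk)

theorem next_extract_cons (arr : List Int) (n i j0 : Nat) (rest : List Nat) (hi : i < n)
    (h : popLoop arr (arr.getD i 0) (pvT arr n (n - 1 - i)) = j0 :: rest) :
    i < j0 ∧ j0 < n ∧ arr.getD i 0 ≤ arr.getD j0 0 ∧
      ∀ j, i < j → j < j0 → arr.getD j 0 < arr.getD i 0 := by
  obtain ⟨hpw, hrg, hcov⟩ := pvT_inv arr n (n - 1 - i) (by omega)
  rw [popLoop_eq_dropWhile] at h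
  have hj0mem : j0 ∈ pvT arr n (n - 1 - i) :=
    mem_of_mem_dropWhile _ _ _ (h ▸ List.mem_cons_self)
  have hj0rg := hrg j0 hj0mem
  have hij0 : i < j0 := by omega
  have hj0p : ¬ arr.getD j0 0 < arr.getD i 0 := by
    have := dropWhile_head_false _ _ _ _ h
    simpa using this
  have hrmin : ∀ x ∈ (pvT arr n (n - 1 - i)).dropWhile
      (fun j => decide (arr.getD j 0 < arr.getD i 0)), j0 ≤ x := by
    intro x hx
    rw [h] at hx
    rcases List.mem_cons.mp hx with he | hr
    · omega
    · have hpwr : (j0 :: rest).Pairwise (fun a b => a < b) :=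
        h ▸ hpw.sublist (List.dropWhile_sublist _)
      have := (List.pairwise_cons.mp hpwr).1 x hr
      omega
  have key : ∀ d j, j - i ≤ d → i < j → j < j0 → arr.getD j 0 < arr.getD i 0 := by
    intro d
    induction d with
    | zero => intro j hd h1 h2; omega
    | succ d ihd =>
        intro j hd h1 h2
        by_cases hmem : j ∈ pvT arr n (n - 1 - i)
        · have hjnd : j ∉ (pvT arr n (n - 1 - i)).dropWhile
              (fun j => decide (arr.getD j 0 < arr.getD i 0)) := by
            intro hc; have := hrmin j hc; omega
          have hp := takeWhile_or_dropWhile _ _ _ hmem hjnd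
          simpa using hp
        · obtain ⟨k, hk, hkj, hval⟩ := hcov j (by omega) (by omega) hmem
          have hkrg := hrg k hk
          have : arr.getD k 0 < arr.getD i 0 := ihd k (by omega) (by omega) (by omega)
          exact lt_trans hval this
  exact ⟨hij0, hj0rg.2, not_lt.mp hj0p, fun j h1 h2 => key (j - i) j (le_refl _) h1 h2⟩

-- the two passes compute pvP / pvQ
theorem prevPass_eq (arr : List Int) (i : Nat) :
    (List.range i).foldl (prevStep arr) ([], []) = (pvS arr i, (List.range i).map (pvP arr)) := by
  induction i with
  | zero => rfl
  | succ i ih =>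
      rw [List.range_succ, List.foldl_append, ih]
      simp [prevStep, pvS, pvP]

theorem nextPass_foldr (arr : List Int) (n : Nat) (hn : arr.length = n) : ∀ k i, i + k = n →
    (List.range' i k).foldr (fun x y => nextStep arr y x) ([], []) =
      (pvT arr n k, (List.range' i k).map (pvQ arr n)) := by
  intro k
  induction k with
  | zero => intro i h; rfl
  | succ k ih =>
      intro i h
      have hik : (i + 1) + k = n := by omega
      rw [List.range'_succ, List.foldr_cons, ih (i + 1) hik]
      have hi : n - 1 - k = i := by omega
      have hk : n - 1 - i = k := by omega
      simp [nextStep, pvT, pvQ, hi, hk, hn]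

theorem nextPass_eq (arr : List Int) :
    ((List.range arr.length).reverse).foldl (nextStep arr) ([], []) =
      (pvT arr arr.length arr.length, (List.range arr.length).map (pvQ arr arr.length)) := by
  rw [List.foldl_reverse, List.range_eq_range']
  rw [nextPass_foldr arr arr.length rfl arr.length 0 (by omega)]

-- per-index equalities
theorem clen_all (arr : List Int) (v : Int) (i : Nat)
    (h : ∀ j, j < i → arr.getD j 0 < v) : clen arr v i = i := by
  induction i with
  | zero => rfl
  | succ i ih =>
      simp only [clen, h i (by omega), if_true]
      rw [ih (fun j hj => h j (by omega))]

theorem clen_stop (arr : List Int) (v : Int) (i j0 : Nat) (h0 : j0 < i)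
    (hstop : ¬ arr.getD j0 0 < v) (h : ∀ j, j0 < j → j < i → arr.getD j 0 < v) :
    clen arr v i = i - j0 - 1 := by
  induction i with
  | zero => omega
  | succ i ih =>
      by_cases hij : j0 = i
      · subst hij; simp only [clen, if_neg hstop]; omega
      · have h0' : j0 < i := by omega
        simp only [clen, h i (by omega) (by omega), if_true]
        rw [ih h0' (fun j hj hji => h j hj (by omega))]
        omega

theorem crlen_all (arr : List Int) (v : Int) (s : Nat)
    (h : ∀ j, s ≤ j → j < arr.length → arr.getD j 0 < v) :
    crlen arr v s = arr.length - s := by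
  by_cases hs : s < arr.length
  · rw [crlen]
    simp only [hs, dif_pos, h s (by omega) hs, if_true]
    rw [crlen_all arr v (s + 1) (fun j hj hjl => h j (by omega) hjl)]
    omega
  · rw [crlen]; simp only [hs, dif_neg, not_false_iff]; omega
termination_by arr.length - s

theorem crlen_stop (arr : List Int) (v : Int) (s j0 : Nat) (hs : s ≤ j0) (hj0 : j0 < arr.length)
    (hstop : ¬ arr.getD j0 0 < v) (h : ∀ j, s ≤ j → j < j0 → arr.getD j 0 < v) :
    crlen arr v s = j0 - s := by
  by_cases hsj : s = j0
  · subst hsj; rw [crlen]; rw [dif_pos hj0, if_neg hstop]; omega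
  · have hs' : s < j0 := by omega
    have hsl : s < arr.length := by omega
    rw [crlen, dif_pos hsl, if_pos (h s (le_refl _) hs')]
    rw [crlen_stop arr v (s + 1) j0 (by omega) hj0 hstop (fun j hj hjl => h j (by omega) hjl)]
    omega
termination_by arr.length - s

theorem left_eq (arr : List Int) (i : Nat) :
    (i : Int) - pvP arr i - 1 = (clen arr (arr.getD i 0) i : Int) := by
  unfold pvP
  cases hpl : popLoop arr (arr.getD i 0) (pvS arr i) with
  | nil =>
      rw [clen_all arr _ i (prev_extract_empty arr i hpl)]
      simp
  | cons j0 rest =>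
      obtain ⟨hj0, hge, hgap⟩ := prev_extract_cons arr i j0 rest hpl
      rw [clen_stop arr _ i j0 hj0 (by exact not_lt.mpr hge) hgap]
      push_cast [Nat.sub_sub]
      omega

theorem right_eq (arr : List Int) (i : Nat) (hi : i < arr.length) :
    pvQ arr arr.length i - (i : Int) - 1 = (crlen arr (arr.getD i 0) (i + 1) : Int) := by
  unfold pvQ
  cases hpl : popLoop arr (arr.getD i 0) (pvT arr arr.length (arr.length - 1 - i)) with
  | nil =>
      rw [crlen_all arr _ (i + 1) (fun j hj hjl => next_extract_empty arr arr.length i rfl hi hpl j (by omega) hjl)]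
      push_cast
      omega
  | cons j0 rest =>
      obtain ⟨hij0, hj0n, hge, hgap⟩ := next_extract_cons arr arr.length i j0 rest hi hpl
      rw [crlen_stop arr _ (i + 1) j0 (by omega) hj0n (by exact not_lt.mpr hge)
        (fun j hj hjl => hgap j (by omega) hjl)]
      push_cast
      omega

theorem map_range_getD {α : Type} (f : Nat → α) (n i : Nat) (d : α) (hi : i < n) :
    ((List.range n).map f).getD i d = f i := by
  rw [List.getD_eq_getElem?_getD, List.getElem?_map, List.getElem?_range hi]
  rfl

theorem maxPeople_eq_alt (arr : List Int) : maxPeople arr = maxPeople_alt arr := by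
  simp only [maxPeople, maxPeople_alt]
  rw [prevPass_eq, nextPass_eq]
  apply PySem.List.foldl_congr_mem
  intro acc i hi
  have hin : i < arr.length := List.mem_range.mp hi
  rw [map_range_getD _ _ _ _ hin, map_range_getD _ _ _ _ hin]
  have hl := left_eq arr i
  have hr := right_eq arr i hin
  rw [hl, hr]
  push_cast
  ring_nf

-- ===== VERDICT (by name: the statement is the Claim_ definition above) =====
theorem maxPeople_spec : Claim_equal_maxPeople := by
  intro arr _
  unfold Spec_maxPeople
  exact maxPeople_eq_alt arr
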